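-- pv_equiv track=rewrite | github.com/oeg-upm/shacl_integration | shacl_integration_app/service/integration_engine/identification/cluster_generation/tuple_processor.py | remove_fully_contained_tuples
-- ===== SOURCE A (Python) =====
-- from typing import List, Tuple
--
-- def remove_fully_contained_tuples(tuple_list: List[Tuple[str]]) -> List[Tuple[str]]:
--     tuple_sets = [(t, set(t)) for t in tuple_list]
--     result = []
--
--     for i, (t1, s1) in enumerate(tuple_sets):
--         is_contained = False
--         for j, (t2, s2) in enumerate(tuple_sets):
--             if i != j and s1.issubset(s2) and len(s2) > len(s1):
--                 is_contained = True
--                 break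
--         if not is_contained:
--             result.append(t1)
--     return result
-- ===== SOURCE B (Python) =====
-- def remove_fully_contained_tuples(tuple_list):
--     # Sort a copy by element-set size (descending); a tuple can only be
--     # strictly contained in an entry of strictly larger set size, and all
--     # such entries come earlier in the sorted order, so each entry is
--     # checked against the already-walked prefix only.  Survivors are
--     # re-sorted by original index to restore input order.
--     entries = [(i, t, set(t)) for i, t in enumerate(tuple_list)]
--     order = sorted(entries, key=lambda e: len(e[2]), reverse=True)
--     kept = []
--     seen = []
--     for e in order:
--         i, t, s = e
--         if not any(len(s2) > len(s) and s <= s2 for (_, _, s2) in seen):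
--             kept.append(e)
--         seen.append(e)
--     kept.sort(key=lambda e: e[0])
--     return [t for (i, t, s) in kept]
-- ===== Notes on version B (the rewrite author's own statement) =====
-- stated objective: alternative
-- what changed: B sorts an indexed copy by set size descending, keeps each entry unless an already-walked (hence at-least-as-large) entry is a strictly larger superset, and restores input order by sorting survivors by original index, replacing A's full nested scan over all pairs.
import Mathlib
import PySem

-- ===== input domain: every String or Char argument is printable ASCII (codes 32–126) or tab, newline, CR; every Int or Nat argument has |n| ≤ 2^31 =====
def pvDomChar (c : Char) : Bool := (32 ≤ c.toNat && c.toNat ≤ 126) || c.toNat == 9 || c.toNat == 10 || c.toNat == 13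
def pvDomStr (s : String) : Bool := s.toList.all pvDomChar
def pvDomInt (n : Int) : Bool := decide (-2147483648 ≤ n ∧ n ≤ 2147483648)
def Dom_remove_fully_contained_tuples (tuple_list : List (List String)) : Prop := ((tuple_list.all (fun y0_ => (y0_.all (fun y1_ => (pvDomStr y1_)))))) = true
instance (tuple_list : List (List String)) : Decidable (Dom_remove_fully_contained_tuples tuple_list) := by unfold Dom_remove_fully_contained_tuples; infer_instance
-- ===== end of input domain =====

-- B replaces A's full nested scan by a walk of a copy sorted by set size descending,
-- checking each entry only against the already-walked prefix, then restores input
-- order by sorting survivors by original index (alternative decomposition; same result).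

-- ===== PORT A =====
-- (Python's locals tuple_sets / is_contained are inlined; the inner loop with
--  break is the first-match scan List.any)
def remove_fully_contained_tuples (tuple_list : List (List String)) : List (List String) :=
  (PySem.List.enumerate (tuple_list.map (fun t => (t, PySem.Set.ofList t)))).foldl (fun result p =>
    if (PySem.List.enumerate (tuple_list.map (fun t => (t, PySem.Set.ofList t)))).any (fun q =>
      p.1 != q.1 && PySem.Set.issubset p.2.2 q.2.2 &&
        decide (PySem.Set.len p.2.2 < PySem.Set.len q.2.2))
    then result else result ++ [p.2.1]) []

-- ===== PORT B =====
-- "d strictly contains e": B's generator condition  len(s2) > len(s) and s <= s2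
def pvP (e d : Int × List String × PySem.Set String) : Bool :=
  decide (PySem.Set.len e.2.2 < PySem.Set.len d.2.2) && PySem.Set.issubset e.2.2 d.2.2

-- B's  entries = [(i, t, set(t)) for i, t in enumerate(tuple_list)]
def pvEntries (tuple_list : List (List String)) : List (Int × List String × PySem.Set String) :=
  (PySem.List.enumerate tuple_list).map (fun p => (p.1, p.2, PySem.Set.ofList p.2))

-- one iteration of B's walk: state = (kept, seen)
def pvAltStep
    (st : List (Int × List String × PySem.Set String) × List (Int × List String × PySem.Set String))
    (e : Int × List String × PySem.Set String) :
    List (Int × List String × PySem.Set String) × List (Int × List String × PySem.Set String) :=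
  (if st.2.any (pvP e) then st.1 else st.1 ++ [e], st.2 ++ [e])

def remove_fully_contained_tuples_alt (tuple_list : List (List String)) : List (List String) :=
  (PySem.List.sorted
    (((PySem.List.sorted (pvEntries tuple_list) (fun e => PySem.Set.len e.2.2) true).foldl
        pvAltStep ([], [])).1)
    (fun e => e.1)).map (fun e => e.2.1)

-- ===== PRECONDITION & SPEC =====
def Spec_remove_fully_contained_tuples (tuple_list : List (List String)) (out : List (List String)) : Prop := out = remove_fully_contained_tuples_alt tuple_list
instance (tuple_list : List (List String)) (out : List (List String)) : Decidable (Spec_remove_fully_contained_tuples tuple_list out) := by unfold Spec_remove_fully_contained_tuples; infer_instance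

-- ===== CLAIM (what is proved, stated in full; the proofs are below) =====
def Claim_equal_remove_fully_contained_tuples : Prop := ∀ (tuple_list : List (List String)), Dom_remove_fully_contained_tuples tuple_list → Spec_remove_fully_contained_tuples tuple_list (remove_fully_contained_tuples tuple_list)

-- ===== LEMMAS AND PROOFS =====

theorem pvEnumerate_map {α β : Type} (f : α → β) (xs : List α) (s : Int) :
    PySem.List.enumerate (xs.map f) s = (PySem.List.enumerate xs s).map (fun p => (p.1, f p.2)) := by
  induction xs generalizing s with
  | nil => simp [PySem.List.enumerate_nil]
  | cons x xs ih => simp [PySem.List.enumerate_cons, ih]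

theorem pvEntries_pairwise (tl : List (List String)) :
    (pvEntries tl).Pairwise (fun a b => a.1 < b.1) := by
  unfold pvEntries
  refine List.Pairwise.map _ (fun a b h => h) ?_
  exact PySem.List.pairwise_lt_enumerate tl 0

theorem pvEntries_fst_inj (tl : List (List String))
    {p q : Int × List String × PySem.Set String}
    (hp : p ∈ pvEntries tl) (hq : q ∈ pvEntries tl) (h : p.1 = q.1) : p = q := by
  unfold pvEntries at hp hq
  obtain ⟨p', hp', rfl⟩ := List.mem_map.1 hp
  obtain ⟨q', hq', rfl⟩ := List.mem_map.1 hq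
  rw [PySem.List.mem_enumerate_iff] at hp' hq'
  obtain ⟨k, hk, rfl⟩ := hp'
  obtain ⟨k', hk', rfl⟩ := hq'
  simp only [zero_add] at h
  have hkk : k = k' := by exact_mod_cast h
  subst hkk
  rfl

-- pvP e e is never true
theorem pvP_self (e : Int × List String × PySem.Set String) : pvP e e = false := by
  simp [pvP]

-- A is a filter of the entries by "no strict container anywhere"
theorem pvA_eq (tl : List (List String)) :
    remove_fully_contained_tuples tl =
      ((pvEntries tl).filter (fun p => ! (pvEntries tl).any (pvP p))).map (fun p => p.2.1) := by
  unfold remove_fully_contained_tuples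
  rw [pvEnumerate_map]
  have hbody : (fun (result : List (List String)) (p : Int × List String × PySem.Set String) =>
      if (pvEntries tl).any (fun q => p.1 != q.1 && PySem.Set.issubset p.2.2 q.2.2 &&
          decide (PySem.Set.len p.2.2 < PySem.Set.len q.2.2)) then result else result ++ [p.2.1])
      = (fun result p =>
      if (! (pvEntries tl).any (fun q => p.1 != q.1 && PySem.Set.issubset p.2.2 q.2.2 &&
          decide (PySem.Set.len p.2.2 < PySem.Set.len q.2.2))) = true then result ++ [p.2.1] else result) := by
    funext result p
    cases h : (pvEntries tl).any (fun q => p.1 != q.1 && PySem.Set.issubset p.2.2 q.2.2 &&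
        decide (PySem.Set.len p.2.2 < PySem.Set.len q.2.2)) <;> simp
  rw [show (PySem.List.enumerate tl 0).map (fun p => (p.1, p.2, PySem.Set.ofList p.2)) = pvEntries tl from rfl,
      hbody, PySem.List.foldl_append_if]
  rw [List.nil_append]
  congr 1
  apply List.filter_congr
  intro p hp
  congr 1
  -- the two any-conditions agree for p a member of the entries
  rcases h : (pvEntries tl).any (pvP p) with _ | _
  · simp only [List.any_eq_false] at h ⊢
    intro q hq
    specialize h q hq
    simp [pvP] at h ⊢
    intro _ hsub
    by_cases hlen : List.length p.2.2 < List.length q.2.2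
    · obtain ⟨x, hx, hnx⟩ := h hlen
      exact absurd (hsub x hx) hnx
    · omega
  · simp only [List.any_eq_true] at h ⊢
    obtain ⟨q, hq, hPq⟩ := h
    refine ⟨q, hq, ?_⟩
    simp [pvP] at hPq ⊢
    refine ⟨⟨?_, hPq.2⟩, hPq.1⟩
    intro hfst
    have := pvEntries_fst_inj tl hp hq hfst
    subst this
    exact absurd hPq.1 (lt_irrefl _)

-- the sequential "check against seen" filter B computes
def pvGo (seen : List (Int × List String × PySem.Set String)) :
    List (Int × List String × PySem.Set String) → List (Int × List String × PySem.Set String)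
  | [] => []
  | e :: l => (if seen.any (pvP e) then [] else [e]) ++ pvGo (seen ++ [e]) l

theorem pvFoldl_altStep (l seen kept : List (Int × List String × PySem.Set String)) :
    (l.foldl pvAltStep (kept, seen)) = (kept ++ pvGo seen l, seen ++ l) := by
  induction l generalizing seen kept with
  | nil => simp [pvGo]
  | cons e l ih =>
    simp only [List.foldl_cons, pvAltStep, pvGo]
    cases h : seen.any (pvP e) <;> simp [ih, List.append_assoc]

-- on a size-descending list, checking the walked prefix = checking the whole list
theorem pvGo_eq_filter (l seen : List (Int × List String × PySem.Set String))
    (hpw : (seen ++ l).Pairwise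
      (fun a b => PySem.Set.len b.2.2 ≤ PySem.Set.len a.2.2)) :
    pvGo seen l = l.filter (fun e => ! (seen ++ l).any (pvP e)) := by
  induction l generalizing seen with
  | nil => simp [pvGo]
  | cons e l ih =>
    have hassoc : seen ++ e :: l = (seen ++ [e]) ++ l := by simp
    have htail : ((e :: l).Pairwise
        (fun a b => PySem.Set.len b.2.2 ≤ PySem.Set.len a.2.2)) :=
      hpw.sublist (List.sublist_append_right seen (e :: l))
    have hafter : ∀ d ∈ l, PySem.Set.len d.2.2 ≤ PySem.Set.len e.2.2 :=
      (List.pairwise_cons.1 htail).1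
    -- the head and the tail contribute nothing to e's any
    have hany : (seen ++ e :: l).any (pvP e) = seen.any (pvP e) := by
      simp only [List.any_append, List.any_cons, pvP_self, Bool.false_or]
      rcases hl : l.any (pvP e) with _ | _
      · simp
      · exfalso
        obtain ⟨d, hd, hPd⟩ := List.any_eq_true.1 hl
        have hle := hafter d hd
        simp [pvP, PySem.Set.len] at hPd hle
        omega
    rw [pvGo, List.filter_cons]
    have hrec := ih (seen ++ [e]) (by rw [← hassoc]; exact hpw)
    rw [hrec, ← hassoc, hany]
    cases h : seen.any (pvP e) <;> simp

theorem pvB_eq (tl : List (List String)) :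
    remove_fully_contained_tuples_alt tl =
      ((pvEntries tl).filter (fun p => ! (pvEntries tl).any (pvP p))).map (fun p => p.2.1) := by
  unfold remove_fully_contained_tuples_alt
  show (PySem.List.sorted
      ((PySem.List.sorted (pvEntries tl) (fun e => PySem.Set.len e.2.2) true).foldl
        pvAltStep ([], [])).1 (fun e => e.1)).map (fun e => e.2.1) = _
  set order := PySem.List.sorted (pvEntries tl) (fun e => PySem.Set.len e.2.2) true with horder
  have hperm : order.Perm (pvEntries tl) := PySem.List.sorted_perm _ _ _
  rw [pvFoldl_altStep]
  simp only [List.nil_append]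
  rw [pvGo_eq_filter order [] (by
    simpa using PySem.List.sorted_pairwise_rev (pvEntries tl) (fun e => PySem.Set.len e.2.2))]
  simp only [List.nil_append]
  -- replace the any over order by the any over entries (permutation)
  have hanyeq : ∀ e, order.any (pvP e) = (pvEntries tl).any (pvP e) := by
    intro e
    rcases h : (pvEntries tl).any (pvP e) with _ | _
    · simp only [List.any_eq_false] at h ⊢
      exact fun d hd => h d (hperm.mem_iff.1 hd)
    · simp only [List.any_eq_true] at h ⊢
      obtain ⟨d, hd, hPd⟩ := h
      exact ⟨d, hperm.mem_iff.2 hd, hPd⟩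
  have hfilter : order.filter (fun e => ! order.any (pvP e)) =
      order.filter (fun e => ! (pvEntries tl).any (pvP e)) :=
    List.filter_congr (fun e _ => by rw [hanyeq])
  rw [hfilter]
  -- the survivors, re-sorted by index, are exactly the filter of the entries in order
  have hpermf : (order.filter (fun e => ! (pvEntries tl).any (pvP e))).Perm
      ((pvEntries tl).filter (fun e => ! (pvEntries tl).any (pvP e))) :=
    hperm.filter _
  have hpwf : ((pvEntries tl).filter (fun e => ! (pvEntries tl).any (pvP e))).Pairwise
      (fun a b => a.1 < b.1) := (pvEntries_pairwise tl).filter _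
  rw [PySem.List.sorted_eq_of_perm_of_pairwise_lt _ _ (fun e => e.1) hpermf.symm hpwf]

-- ===== VERDICT (by name: the statement is the Claim_ definition above) =====
theorem remove_fully_contained_tuples_spec : Claim_equal_remove_fully_contained_tuples := by
  intro tl _
  show remove_fully_contained_tuples tl = remove_fully_contained_tuples_alt tl
  rw [pvA_eq, pvB_eq]
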